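-- pv_equiv track=rewrite | github.com/NoiserMars/TSGExplorer | tsg_tool.py | _unswizzle_palette_8bit
-- ===== SOURCE A (Python) =====
-- def _unswizzle_palette_8bit(palette):
--     """Unswizzle a 256-entry PS2 CLUT palette (CSM1 rearrangement).
--     PS2 stores 256-color palettes in groups of 32 with interleaved order:
--     [0-7, 16-23, 8-15, 24-31] repeated for each block of 32."""
--     if len(palette) != 256:
--         return palette
--     out = [None] * 256
--     for i in range(256):
--         block = (i // 32) * 32
--         sub = i % 32
--         if sub < 8:
--             out[block + sub] = palette[block + sub]
--         elif sub < 16: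
--             out[block + sub] = palette[block + sub + 8]
--         elif sub < 24:
--             out[block + sub] = palette[block + sub - 8]
--         else:
--             out[block + sub] = palette[block + sub]
--     return out
-- ===== SOURCE B (Python) =====
-- def _unswizzle_palette_8bit(palette):
--     """Unswizzle a 256-entry PS2 CLUT palette (CSM1 rearrangement).
--     One slice pass per 32-entry block: swap the two middle 8-entry runs."""
--     if len(palette) != 256:
--         return palette
--     out = []
--     for block in range(0, 256, 32):
--         out += (palette[block:block + 8]
--                 + palette[block + 16:block + 24]
--                 + palette[block + 8:block + 16]
--                 + palette[block + 24:block + 32])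
--     return out
-- ===== Notes on version B (the rewrite author's own statement) =====
-- stated objective: simpler
-- what changed: Replaces the 256-iteration per-index loop with a four-way modular branch by a single pass over the eight 32-entry blocks that concatenates four slices per block (swapping the two middle 8-entry runs).
import Mathlib
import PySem

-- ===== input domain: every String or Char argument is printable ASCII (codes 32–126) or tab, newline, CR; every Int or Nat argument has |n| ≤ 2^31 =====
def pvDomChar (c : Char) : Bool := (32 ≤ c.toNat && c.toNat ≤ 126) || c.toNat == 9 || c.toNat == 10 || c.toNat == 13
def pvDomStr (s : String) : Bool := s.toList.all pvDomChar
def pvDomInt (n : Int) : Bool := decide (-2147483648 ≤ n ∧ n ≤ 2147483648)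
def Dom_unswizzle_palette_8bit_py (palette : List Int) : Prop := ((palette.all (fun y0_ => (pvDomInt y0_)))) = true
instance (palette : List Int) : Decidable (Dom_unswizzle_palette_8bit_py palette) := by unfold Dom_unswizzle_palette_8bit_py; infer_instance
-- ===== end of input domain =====

-- B replaces A's 256-iteration four-way-branch index loop by one slice pass over the eight
-- 32-entry blocks, swapping the two middle 8-entry runs of each block (objective: simpler).


-- ===== PORT A =====
-- 'out = [None] * 256' is modelled as 'List.replicate 256 (none : Option Int)'; the loop writes
-- every slot (proved by the equivalence theorem), so the final 'map (·.getD 0)' extracts the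
-- stored Int exactly; every read/write index lies in [0, 256), where pyGetD/pySetD are exact.
def unswizzle_palette_8bit_py (palette : List Int) : List Int :=
  if palette.length ≠ 256 then palette
  else
    ((PySem.List.pyRange 0 256 1).foldl
      (fun out i =>
        let block := (PySem.Int.floordiv i 32) * 32
        let sub := PySem.Int.mod i 32
        if sub < 8 then
          PySem.List.pySetD out (block + sub) (some (PySem.List.pyGetD palette (block + sub) 0))
        else if sub < 16 then
          PySem.List.pySetD out (block + sub) (some (PySem.List.pyGetD palette (block + sub + 8) 0))
        else if sub < 24 then
          PySem.List.pySetD out (block + sub) (some (PySem.List.pyGetD palette (block + sub - 8) 0))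
        else
          PySem.List.pySetD out (block + sub) (some (PySem.List.pyGetD palette (block + sub) 0)))
      (List.replicate 256 (none : Option Int))).map (fun o => o.getD 0)

-- ===== PORT B =====
def unswizzle_palette_8bit_py_alt (palette : List Int) : List Int :=
  if palette.length ≠ 256 then palette
  else
    (PySem.List.pyRange 0 256 32).foldl
      (fun out block =>
        out ++ (PySem.List.slice palette (some block) (some (block + 8))
             ++ PySem.List.slice palette (some (block + 16)) (some (block + 24))
             ++ PySem.List.slice palette (some (block + 8)) (some (block + 16))
             ++ PySem.List.slice palette (some (block + 24)) (some (block + 32))))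
      []

-- ===== PRECONDITION & SPEC =====
def Spec_unswizzle_palette_8bit_py (palette : List Int) (out : List Int) : Prop := out = unswizzle_palette_8bit_py_alt palette
instance (palette : List Int) (out : List Int) : Decidable (Spec_unswizzle_palette_8bit_py palette out) := by unfold Spec_unswizzle_palette_8bit_py; infer_instance

-- ===== CLAIM (what is proved, stated in full; the proofs are below) =====
def Claim_equal_unswizzle_palette_8bit_py : Prop := ∀ (palette : List Int), Dom_unswizzle_palette_8bit_py palette → Spec_unswizzle_palette_8bit_py palette (unswizzle_palette_8bit_py palette)

-- ===== LEMMAS AND PROOFS =====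

-- the source index A's loop reads for destination index j (j < 256)
def pvSrc (j : Nat) : Nat :=
  let s := j % 32
  if s < 8 then j else if s < 16 then j + 8 else if s < 24 then j - 8 else j

-- folding 'set j (g j)' over range' k m rewrites exactly the window [k, k+m)
theorem foldl_set_range' {α : Type} (g : Nat → α) :
    ∀ (m k : Nat) (out : List α), k + m ≤ out.length →
      (List.range' k m).foldl (fun o j => o.set j (g j)) out
        = out.take k ++ (List.range' k m).map g ++ out.drop (k + m) := by
  intro m
  induction m with
  | zero => intro k out h; simp
  | succ m ih =>
    intro k out h
    rw [List.range'_succ, List.map_cons]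
    simp only [List.foldl_cons]
    rw [ih (k + 1) (out.set k (g k)) (by simp; omega)]
    have hk : k < out.length := by omega
    rw [List.set_eq_take_append_cons_drop.trans (if_pos hk)]
    have e1 : (out.take k ++ g k :: out.drop (k+1)).take (k+1) = out.take k ++ [g k] := by
      rw [List.take_append]
      simp [List.length_take, Nat.min_eq_left hk.le]
    have e2 : (out.take k ++ g k :: out.drop (k+1)).drop (k+1+m) = out.drop (k+1+m) := by
      rw [List.drop_append]
      simp [List.length_take, Nat.min_eq_left hk.le]
      rw [List.drop_eq_nil_of_le (by simp; omega), show k+1+m-k = m+1 by omega,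
        List.drop_succ_cons, List.drop_drop]
      simp
    rw [e1, e2, show k+(m+1) = k+1+m by omega]
    simp

-- a contiguous drop/take window as a map of reads
theorem drop_take_eq_map (l : List Int) (a k : Nat) (h : a + k ≤ l.length) :
    (l.drop a).take k = (List.range' a k).map (fun i => l.getD i 0) := by
  apply List.ext_getElem
  · simp; omega
  · intro i h1 h2
    simp only [List.getElem_take, List.getElem_drop, List.getElem_map, List.getElem_range']
    rw [List.getD_eq_getElem l 0 (by simp at h2; omega)]
    simp

-- the body of A's loop, applied at index ↑j, sets slot j to the pvSrc-read
theorem bodyA_eq (palette : List Int) (out : List (Option Int)) (j : Nat) :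
    (fun (out : List (Option Int)) (i : Int) =>
      let block := (PySem.Int.floordiv i 32) * 32
      let sub := PySem.Int.mod i 32
      if sub < 8 then
        PySem.List.pySetD out (block + sub) (some (PySem.List.pyGetD palette (block + sub) 0))
      else if sub < 16 then
        PySem.List.pySetD out (block + sub) (some (PySem.List.pyGetD palette (block + sub + 8) 0))
      else if sub < 24 then
        PySem.List.pySetD out (block + sub) (some (PySem.List.pyGetD palette (block + sub - 8) 0))
      else
        PySem.List.pySetD out (block + sub) (some (PySem.List.pyGetD palette (block + sub) 0)))
      out (j : Int)
      = out.set j (some (palette.getD (pvSrc j) 0)) := by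
  show (let block := (PySem.Int.floordiv (j : Int) 32) * 32
        let sub := PySem.Int.mod (j : Int) 32
        if sub < 8 then
          PySem.List.pySetD out (block + sub) (some (PySem.List.pyGetD palette (block + sub) 0))
        else if sub < 16 then
          PySem.List.pySetD out (block + sub) (some (PySem.List.pyGetD palette (block + sub + 8) 0))
        else if sub < 24 then
          PySem.List.pySetD out (block + sub) (some (PySem.List.pyGetD palette (block + sub - 8) 0))
        else
          PySem.List.pySetD out (block + sub) (some (PySem.List.pyGetD palette (block + sub) 0)))
        = out.set j (some (palette.getD (pvSrc j) 0))
  have hb : PySem.Int.floordiv (j : Int) 32 = ((j / 32 : Nat) : Int) := PySem.Int.floordiv_natCast j 32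
  have hs : PySem.Int.mod (j : Int) 32 = ((j % 32 : Nat) : Int) := PySem.Int.mod_natCast j 32
  have hsum : ((j / 32 : Nat) : Int) * 32 + ((j % 32 : Nat) : Int) = ((j : Nat) : Int) := by
    push_cast; omega
  simp only [hb, hs, hsum, pvSrc]
  by_cases h1 : j % 32 < 8
  · rw [if_pos (by exact_mod_cast h1), if_pos h1,
      PySem.List.pyGetD_natCast, PySem.List.pySetD_natCast]
  rw [if_neg (by exact_mod_cast h1), if_neg h1]
  by_cases h2 : j % 32 < 16
  · rw [if_pos (by exact_mod_cast h2), if_pos h2,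
      show ((j : Nat) : Int) + 8 = ((j + 8 : Nat) : Int) by push_cast; ring,
      PySem.List.pyGetD_natCast, PySem.List.pySetD_natCast]
  rw [if_neg (by exact_mod_cast h2), if_neg h2]
  by_cases h3 : j % 32 < 24
  · rw [if_pos (by exact_mod_cast h3), if_pos h3,
      show ((j : Nat) : Int) - 8 = ((j - 8 : Nat) : Int) by
        have : 8 ≤ j := by omega
        push_cast [this]; ring,
      PySem.List.pyGetD_natCast, PySem.List.pySetD_natCast]
  rw [if_neg (by exact_mod_cast h3), if_neg h3]
  rw [PySem.List.pyGetD_natCast, PySem.List.pySetD_natCast]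

-- A's result on a 256-entry palette, as a map over the destination indices
theorem portA_char (palette : List Int) (hlen : palette.length = 256) :
    unswizzle_palette_8bit_py palette
      = (List.range' 0 256).map (fun j => palette.getD (pvSrc j) 0) := by
  unfold unswizzle_palette_8bit_py
  rw [if_neg (by simp [hlen])]
  rw [PySem.List.pyRange_one]
  simp only [show ((256:Int) - 0).toNat = 256 from rfl, zero_add]
  rw [List.foldl_map]
  rw [show (fun (out : List (Option Int)) (k : Nat) =>
        (fun (out : List (Option Int)) (i : Int) =>
          let block := (PySem.Int.floordiv i 32) * 32
          let sub := PySem.Int.mod i 32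
          if sub < 8 then
            PySem.List.pySetD out (block + sub) (some (PySem.List.pyGetD palette (block + sub) 0))
          else if sub < 16 then
            PySem.List.pySetD out (block + sub) (some (PySem.List.pyGetD palette (block + sub + 8) 0))
          else if sub < 24 then
            PySem.List.pySetD out (block + sub) (some (PySem.List.pyGetD palette (block + sub - 8) 0))
          else
            PySem.List.pySetD out (block + sub) (some (PySem.List.pyGetD palette (block + sub) 0)))
          out (k : Int))
      = fun out j => out.set j (some (palette.getD (pvSrc j) 0)) from
        funext fun out => funext fun j => bodyA_eq palette out j]
  rw [List.range_eq_range', foldl_set_range' _ 256 0 _ (by rw [List.length_replicate])]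
  rw [List.take_zero, List.nil_append, show (0+256 : Nat) = 256 from rfl,
    List.drop_eq_nil_of_le (by rw [List.length_replicate]), List.append_nil, List.map_map]
  rfl

-- B's result on a 256-entry palette, as the same map
set_option maxRecDepth 4096 in
theorem portB_char (palette : List Int) (hlen : palette.length = 256) :
    unswizzle_palette_8bit_py_alt palette
      = (List.range' 0 256).map (fun j => palette.getD (pvSrc j) 0) := by
  unfold unswizzle_palette_8bit_py_alt
  rw [if_neg (by simp [hlen])]
  rw [show PySem.List.pyRange 0 256 32 = [0,32,64,96,128,160,192,224] from by decide]
  simp only [List.foldl_cons, List.foldl_nil, List.nil_append]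
  simp [PySem.List.slice_toNat]
  have hp : ∀ (a k : Nat), a + k ≤ 256 → List.take k (List.drop a palette)
      = (List.range' a k).map (fun i => palette[i]?.getD 0) := by
    intro a k h
    rw [drop_take_eq_map palette a k (by omega)]
    simp
  have h0 : List.take 8 palette = List.map (fun i => palette[i]?.getD 0) (List.range' 0 8) := by
    have := hp 0 8 (by norm_num)
    simpa using this
  rw [h0, hp 16 8 (by norm_num), hp 8 8 (by norm_num), hp 24 8 (by norm_num),
    hp 32 8 (by norm_num), hp 48 8 (by norm_num), hp 40 8 (by norm_num), hp 56 8 (by norm_num),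
    hp 64 8 (by norm_num), hp 80 8 (by norm_num), hp 72 8 (by norm_num), hp 88 8 (by norm_num),
    hp 96 8 (by norm_num), hp 112 8 (by norm_num), hp 104 8 (by norm_num), hp 120 8 (by norm_num),
    hp 128 8 (by norm_num), hp 144 8 (by norm_num), hp 136 8 (by norm_num), hp 152 8 (by norm_num),
    hp 160 8 (by norm_num), hp 176 8 (by norm_num), hp 168 8 (by norm_num), hp 184 8 (by norm_num),
    hp 192 8 (by norm_num), hp 208 8 (by norm_num), hp 200 8 (by norm_num), hp 216 8 (by norm_num),
    hp 224 8 (by norm_num), hp 240 8 (by norm_num), hp 232 8 (by norm_num), hp 248 8 (by norm_num)]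
  rw [show (fun j => palette[pvSrc j]?.getD 0) = ((fun i => palette[i]?.getD 0) ∘ pvSrc) from rfl,
    ← List.map_map]
  simp only [← List.map_append]
  apply congrArg
  decide

-- ===== VERDICT (by name: the statement is the Claim_ definition above) =====
theorem unswizzle_palette_8bit_py_spec : Claim_equal_unswizzle_palette_8bit_py := by
  intro palette _
  unfold Spec_unswizzle_palette_8bit_py
  by_cases hlen : palette.length = 256
  · rw [portA_char palette hlen, portB_char palette hlen]
  · unfold unswizzle_palette_8bit_py unswizzle_palette_8bit_py_alt
    rw [if_pos hlen, if_pos hlen]
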